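-- pv_equiv track=rewrite | github.com/deadcoast/Space_Muck | src/tools/convert_lazy_formatting/convert_to_lazy_formatting.py | _find_placeholders_in_string
-- ===== SOURCE A (Python) =====
-- def _find_placeholders_in_string(s: str):
--     """
--     Return a list of substring placeholders like "{}", "{0}", "{name}", "{name:0.2f}".
--     This method is here mainly for illustration; we won't do advanced checks,
--     but we do highlight how you might approach it.
--     """
--     # In this script, we don't actually need the raw placeholders separately,
--     # since we parse them inline in _transform_dot_format_call. This is just for reference
--     results = []
--     idx = 0
--     while True:
--         start = s.find("{", idx)
--         if start == -1:
--             break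
--         end = s.find("}", start + 1)
--         if end == -1:
--             break
--         results.append(s[start : end + 1])
--         idx = end + 1
--     return results
-- ===== SOURCE B (Python) =====
-- def _find_placeholders_in_string(s: str):
--     """Single left-to-right scan with an open-brace buffer (no repeated find/slice)."""
--     results = []
--     buf = None
--     for ch in s:
--         if buf is None:
--             if ch == "{":
--                 buf = "{"
--         else:
--             buf += ch
--             if ch == "}":
--                 results.append(buf)
--                 buf = None
--     return results
-- ===== Notes on version B (the rewrite author's own statement) =====
-- stated objective: alternative
-- what changed: Replaced the repeated find/find/slice index loop with a single left-to-right character scan maintaining an optional open-brace buffer, emitting a placeholder each time a closing brace ends it.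
import Mathlib
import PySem

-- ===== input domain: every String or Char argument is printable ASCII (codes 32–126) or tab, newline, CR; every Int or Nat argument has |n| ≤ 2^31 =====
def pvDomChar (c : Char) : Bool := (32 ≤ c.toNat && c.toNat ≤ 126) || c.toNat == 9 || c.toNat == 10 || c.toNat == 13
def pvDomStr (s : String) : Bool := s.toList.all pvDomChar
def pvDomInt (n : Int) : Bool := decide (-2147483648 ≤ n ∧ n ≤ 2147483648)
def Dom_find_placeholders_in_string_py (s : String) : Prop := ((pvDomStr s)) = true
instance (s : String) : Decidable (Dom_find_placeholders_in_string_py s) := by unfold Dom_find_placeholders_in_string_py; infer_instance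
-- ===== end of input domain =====

-- B replaces A's repeated find/find/slice index loop with one character scan keeping an open-brace buffer (alternative, same cost).

-- ===== PORT A =====
-- literal port of A's `while True` find/find/slice loop; `fuel` only makes the
-- recursion total (s.length + 1 steps always suffice since idx strictly grows).
def pvLoopA (s : String) (fuel : Nat) (idx : Nat) (acc : List String) : List String :=
  match fuel with
  | 0 => acc
  | fuel + 1 =>
    let start := PySem.Str.findFrom s "{" (idx : Int)
    if start = -1 then acc
    else
      let e := PySem.Str.findFrom s "}" (start + 1)
      if e = -1 then acc
      else pvLoopA s fuel (e.toNat + 1) (acc ++ [PySem.Str.slice s (some start) (some (e + 1))])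

def find_placeholders_in_string_py (s : String) : List String :=
  pvLoopA s (s.toList.length + 1) 0 []

-- ===== PORT B =====
-- literal port of Source B: single scan, `buf = none` outside braces, `some b` inside.
def pvScanB (cs : List Char) (buf : Option (List Char)) (acc : List String) : List String :=
  match cs with
  | [] => acc
  | c :: rest =>
    match buf with
    | none => if c = '{' then pvScanB rest (some ['{']) acc else pvScanB rest none acc
    | some b =>
      let b' := b ++ [c]
      if c = '}' then pvScanB rest none (acc ++ [String.ofList b']) else pvScanB rest (some b') acc

def find_placeholders_in_string_py_alt (s : String) : List String :=
  pvScanB s.toList none []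

-- ===== PRECONDITION & SPEC =====
def Spec_find_placeholders_in_string_py (s : String) (out : List String) : Prop := out = find_placeholders_in_string_py_alt s
instance (s : String) (out : List String) : Decidable (Spec_find_placeholders_in_string_py s out) := by unfold Spec_find_placeholders_in_string_py; infer_instance

-- ===== CLAIM (what is proved, stated in full; the proofs are below) =====
def Claim_equal_find_placeholders_in_string_py : Prop := ∀ (s : String), Dom_find_placeholders_in_string_py s → Spec_find_placeholders_in_string_py s (find_placeholders_in_string_py s)

-- ===== LEMMAS AND PROOFS =====

-- common specification: structural recursion on the character list
def pvSpecF : List Char → List String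
  | [] => []
  | c :: rest =>
    if c = '{' then
      if '}' ∈ rest then
        String.ofList ('{' :: (rest.takeWhile (· ≠ '}') ++ ['}'])) :: pvSpecF ((rest.dropWhile (· ≠ '}')).tail)
      else []
    else pvSpecF rest
termination_by cs => cs.length
decreasing_by
  · have h1 : ∀ l : List Char, l.tail.length ≤ l.length := fun l => by cases l <;> simp
    have h2 := List.length_dropWhile_le (p := (· ≠ '}')) (l := rest)
    have h3 := h1 (rest.dropWhile (· ≠ '}'))
    simp only [List.length_cons]
    omega
  · simp

theorem pv_singleton_prefix_iff {a : Char} {l : List Char} : [a] <+: l ↔ l.head? = some a := by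
  cases l with
  | nil => simp
  | cons x t => simp [List.cons_prefix_cons, eq_comm]

theorem pv_singleton_infix_iff {a : Char} {l : List Char} : [a] <:+: l ↔ a ∈ l := by
  constructor
  · intro h; exact h.sublist.subset (by simp)
  · intro h
    obtain ⟨t1, t2, rfl⟩ := List.append_of_mem h
    exact ⟨t1, t2, by simp⟩

theorem pv_takeWhile_eq_take {l : List Char} {m : Nat} {c : Char}
    (h1 : ∀ j, j < m → l[j]? ≠ some c) (h2 : l[m]? = some c) :
    l.takeWhile (· ≠ c) = l.take m ∧ l.dropWhile (· ≠ c) = l.drop m := by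
  induction l generalizing m with
  | nil => simp at h2
  | cons x t ih =>
    cases m with
    | zero =>
      simp at h2
      subst h2
      simp [List.takeWhile_cons, List.dropWhile_cons]
    | succ m' =>
      have hx : x ≠ c := by
        have := h1 0 (Nat.succ_pos _); simpa using this
      have ih' := ih (m := m') (fun j hj => by
          have := h1 (j+1) (by omega); simpa using this)
        (by simpa using h2)
      refine ⟨?_, ?_⟩
      · rw [List.takeWhile_cons_of_pos (by simpa using hx), ih'.1, List.take_succ_cons]
      · rw [List.dropWhile_cons_of_pos (by simpa using hx), ih'.2, List.drop_succ_cons]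

theorem pv_specF_no_open {l : List Char} (h : '{' ∉ l) : pvSpecF l = [] := by
  induction l with
  | nil => simp [pvSpecF]
  | cons x t ih =>
    have hx : x ≠ '{' := by intro hc; exact h (hc ▸ List.mem_cons_self ..)
    rw [pvSpecF, if_neg hx]
    exact ih (fun hm => h (List.mem_cons_of_mem _ hm))

theorem pv_specF_skip {t l : List Char} (h : '{' ∉ t) : pvSpecF (t ++ l) = pvSpecF l := by
  induction t with
  | nil => simp
  | cons x u ih =>
    have hx : x ≠ '{' := by intro hc; exact h (hc ▸ List.mem_cons_self ..)
    rw [List.cons_append, pvSpecF, if_neg hx]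
    exact ih (fun hm => h (List.mem_cons_of_mem _ hm))

-- B equals the spec: both statements at once by strong induction on length
theorem pv_scanB_eq (n : Nat) : ∀ cs : List Char, cs.length = n →
    (∀ acc, pvScanB cs none acc = acc ++ pvSpecF cs) ∧
    (∀ b acc, pvScanB cs (some b) acc =
      if '}' ∈ cs then
        (acc ++ [String.ofList (b ++ (cs.takeWhile (· ≠ '}') ++ ['}']))]) ++ pvSpecF ((cs.dropWhile (· ≠ '}')).tail)
      else acc) := by
  induction n using Nat.strong_induction_on with
  | _ n ih =>
    intro cs hn
    cases cs with
    | nil => constructor <;> intros <;> simp [pvScanB, pvSpecF]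
    | cons c rest =>
      have hlt : rest.length < n := by simp at hn; omega
      have IH := ih rest.length hlt rest rfl
      constructor
      · intro acc
        by_cases hc : c = '{'
        · subst hc
          rw [pvScanB]
          simp only [if_pos rfl]
          rw [IH.2 ['{'] acc, pvSpecF]
          by_cases hm : '}' ∈ rest
          · simp [hm]
          · simp [hm]
        · rw [pvScanB]
          simp only [if_neg hc]
          rw [IH.1 acc, pvSpecF, if_neg hc]
      · intro b acc
        by_cases hc : c = '}'
        · subst hc
          rw [pvScanB]
          simp only [if_pos rfl]
          rw [IH.1]
          simp [List.takeWhile_cons, List.dropWhile_cons]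
        · rw [pvScanB]
          simp only [if_neg hc]
          rw [IH.2 (b ++ [c]) acc]
          have hm : ('}' ∈ c :: rest) = ('}' ∈ rest) := by
            simp [List.mem_cons, Ne.symm hc]
          by_cases hmr : '}' ∈ rest
          · simp [hmr, Ne.symm hc, List.takeWhile_cons, List.dropWhile_cons, hc]
          · simp [hmr, Ne.symm hc, hc]

theorem pv_B_eq_spec (s : String) : find_placeholders_in_string_py_alt s = pvSpecF s.toList := by
  have := (pv_scanB_eq s.toList.length s.toList rfl).1 []
  simpa [find_placeholders_in_string_py_alt] using this

-- A equals the spec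
theorem pv_head?_drop {l : List Char} {n : Nat} : (l.drop n).head? = l[n]? := by
  simp [List.head?_drop]

theorem pv_loopA_eq (s : String) : ∀ fuel idx acc, idx ≤ s.toList.length →
    s.toList.length + 1 - idx ≤ fuel →
    pvLoopA s fuel idx acc = acc ++ pvSpecF (s.toList.drop idx) := by
  intro fuel
  induction fuel with
  | zero => intro idx acc h1 h2; omega
  | succ f ih =>
    intro idx acc hidx _
    set cs := s.toList with hcs
    rw [pvLoopA]
    simp only [PySem.Str.findFrom_eq]
    rw [← hcs]
    have hob : ("{" : String).toList = ['{'] := rfl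
    have hcb : ("}" : String).toList = ['}'] := rfl
    rw [hob, hcb]
    by_cases hstart : PySem.Chars.findFrom cs ['{'] (idx : Int) none = -1
    · rw [if_pos hstart]
      have hno : ¬ (['{'] <:+: cs.drop idx) :=
        (PySem.Chars.findFrom_natCast_eq_neg_one_iff cs ['{'] idx hidx).mp hstart
      rw [pv_specF_no_open (by rwa [pv_singleton_infix_iff] at hno)]
      simp
    · rw [if_neg hstart]
      obtain ⟨hle, hpre, hmin⟩ := PySem.Chars.findFrom_natCast_spec cs ['{'] idx hidx hstart
      set st := (PySem.Chars.findFrom cs ['{'] (idx : Int) none).toNat with hst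
      have hstart_eq : PySem.Chars.findFrom cs ['{'] (idx : Int) none = (st : Int) := by
        omega
      have hget : cs[st]? = some '{' := by
        rw [← pv_head?_drop]; rw [pv_singleton_prefix_iff] at hpre; exact hpre
      have hstlen : st < cs.length := by
        by_contra h
        rw [List.getElem?_eq_none (by omega)] at hget; simp at hget
      have hidxst : idx ≤ st := by omega
      -- skip to the first '{'
      have hsplit : cs.drop idx = (cs.drop idx).take (st - idx) ++ cs.drop st := by
        have h := List.take_append_drop (st - idx) (cs.drop idx)
        rw [List.drop_drop] at h
        have he : idx + (st - idx) = st := by omega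
        rw [he] at h
        exact h.symm
      have hnoopen : '{' ∉ (cs.drop idx).take (st - idx) := by
        intro hmem
        obtain ⟨j, hj, hjget⟩ := List.mem_iff_getElem.mp hmem
        have hjlt : j < st - idx := by
          have := List.length_take_le (st - idx) (cs.drop idx); omega
        have hjget' : cs[idx + j]? = some '{' := by
          have h1 : ((cs.drop idx).take (st - idx))[j]? = some '{' := by
            rw [List.getElem?_eq_getElem hj]; exact congrArg some hjget
          rw [List.getElem?_take_of_lt hjlt, List.getElem?_drop] at h1
          exact h1
        exact hmin (idx + j) (by omega) (by omega)
          (by rw [pv_singleton_prefix_iff, pv_head?_drop]; exact hjget')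
      have hdropst : cs.drop st = '{' :: cs.drop (st + 1) := by
        rw [List.drop_eq_getElem_cons hstlen]
        congr 1
        have := hget; rw [List.getElem?_eq_getElem hstlen] at this; simpa using this
      have hspecidx : pvSpecF (cs.drop idx) = pvSpecF ('{' :: cs.drop (st + 1)) := by
        conv_lhs => rw [hsplit]
        rw [pv_specF_skip hnoopen, hdropst]
      rw [hstart_eq]
      have h1 : ((st : Int) + 1) = (((st + 1 : Nat)) : Int) := by push_cast; ring
      rw [h1]
      by_cases hend : PySem.Chars.findFrom cs ['}'] (((st + 1 : Nat)) : Int) none = -1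
      · rw [if_pos hend]
        have hno : ¬ (['}'] <:+: cs.drop (st + 1)) :=
          (PySem.Chars.findFrom_natCast_eq_neg_one_iff cs ['}'] (st + 1) (by omega)).mp hend
        rw [pv_singleton_infix_iff] at hno
        rw [hspecidx, pvSpecF, if_pos rfl, if_neg hno]
        simp
      · rw [if_neg hend]
        obtain ⟨hle2, hpre2, hmin2⟩ := PySem.Chars.findFrom_natCast_spec cs ['}'] (st + 1) (by omega) hend
        set et := (PySem.Chars.findFrom cs ['}'] (((st + 1 : Nat)) : Int) none).toNat with het
        have hend_eq : PySem.Chars.findFrom cs ['}'] (((st + 1 : Nat)) : Int) none = (et : Int) := by omega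
        have hget2 : cs[et]? = some '}' := by
          rw [← pv_head?_drop]; rw [pv_singleton_prefix_iff] at hpre2; exact hpre2
        have hetlen : et < cs.length := by
          by_contra h
          rw [List.getElem?_eq_none (by omega)] at hget2; simp at hget2
        have hstet : st + 1 ≤ et := by omega
        rw [hend_eq]
        rw [ih (et + 1) (acc ++ [PySem.Str.slice s (some (st : Int)) (some ((et : Int) + 1))])
          (by omega) (by omega)]
        -- now compute the spec side
        have hL := pv_takeWhile_eq_take (l := cs.drop (st + 1)) (m := et - (st + 1)) (c := '}')
          (fun j hj => by
            rw [List.getElem?_drop]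
            intro hc
            exact hmin2 (st + 1 + j) (by omega) (by omega)
              (by rw [pv_singleton_prefix_iff, pv_head?_drop]; exact hc))
          (by rw [List.getElem?_drop]
              have he : st + 1 + (et - (st + 1)) = et := by omega
              rw [he]; exact hget2)
        have hdropet : cs.drop et = '}' :: cs.drop (et + 1) := by
          rw [List.drop_eq_getElem_cons hetlen]
          congr 1
          have := hget2; rw [List.getElem?_eq_getElem hetlen] at this; simpa using this
        have hmem2 : '}' ∈ cs.drop (st + 1) := by
          have h5 : '}' ∈ cs.drop et := by rw [hdropet]; simp
          rw [show cs.drop et = (cs.drop (st+1)).drop (et - (st+1)) by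
            rw [List.drop_drop]; congr 1; omega] at h5
          exact List.mem_of_mem_drop h5
        have hdw : (cs.drop (st + 1)).dropWhile (· ≠ '}') = '}' :: cs.drop (et + 1) := by
          rw [hL.2, List.drop_drop]
          have he : st + 1 + (et - (st + 1)) = et := by omega
          rw [he, hdropet]
        rw [hspecidx, pvSpecF, if_pos rfl, if_pos hmem2, hdw]
        simp only [List.tail_cons]
        rw [List.append_assoc]
        congr 2
        -- the slice equals the spec's string
        have hslice : (PySem.Str.slice s (some (st : Int)) (some ((et : Int) + 1))).toList
            = (cs.drop st).take (et + 1 - st) := by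
          have he : ((et : Int) + 1) = (((et + 1 : Nat)) : Int) := by push_cast; ring
          rw [he, PySem.Str.toList_slice, ← hcs, PySem.Chars.slice_eq_listSlice, PySem.List.slice_natCast]
        have htake : (cs.drop st).take (et + 1 - st)
            = '{' :: ((cs.drop (st + 1)).takeWhile (· ≠ '}') ++ ['}']) := by
          rw [hdropst]
          have h2 : et + 1 - st = (et - (st + 1)) + 1 + 1 := by omega
          rw [h2, List.take_succ_cons, hL.1]
          rw [List.take_add_one]
          congr 2
          rw [List.getElem?_drop]
          have h4 : st + 1 + (et - (st + 1)) = et := by omega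
          rw [h4, hget2]
          rfl
        have hstr : PySem.Str.slice s (some (st : Int)) (some ((et : Int) + 1))
            = String.ofList ('{' :: ((cs.drop (st + 1)).takeWhile (· ≠ '}') ++ ['}'])) := by
          apply String.toList_injective
          simp [hslice, htake]
        rw [hstr]
        simp

-- ===== VERDICT (by name: the statement is the Claim_ definition above) =====
theorem find_placeholders_in_string_py_spec : Claim_equal_find_placeholders_in_string_py := by
  intro s _
  unfold Spec_find_placeholders_in_string_py
  rw [pv_B_eq_spec]
  have := pv_loopA_eq s (s.toList.length + 1) 0 [] (by omega) (by omega)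
  simpa [find_placeholders_in_string_py] using this
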